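-- pv_equiv track=rewrite | github.com/hwxrqz/api-hashing-db-ida | calculate_all_hashes_in_DB_exports.py | djb2_custom_hash
-- ===== SOURCE A (Python) =====
-- def djb2_custom_hash(input_string, max_length=0):
--     result = 0x1505
--
--     if isinstance(input_string, str):
--         input_bytes = input_string.encode('latin-1')
--     else:
--         input_bytes = input_string
--
--     for i, char_byte in enumerate(input_bytes):
--         if max_length > 0 and i >= max_length:
--             break
--
--         byte = char_byte
--
--         if byte == 0:
--             break
--
--         if byte >= 0x61 and byte <= 0x7A:  # 'a' to 'z'
--             byte -= 0x20
--
--         result = (32 * (result & 0xFFFFFFFF) + byte + (result & 0xFFFFFFFF)) & 0xFFFFFFFF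
--
--     return result
-- ===== SOURCE B (Python) =====
-- def djb2_custom_hash(input_string, max_length=0):
--     data = input_string.encode('latin-1') if isinstance(input_string, str) else bytes(input_string)
--     if max_length > 0:
--         data = data[:max_length]
--     cut = data.find(0)
--     if cut >= 0:
--         data = data[:cut]
--     M = 1 << 32
--     total = 5381 * pow(33, len(data), M)
--     p = 1
--     for b in reversed(data):
--         total += (b - 0x20 if 0x61 <= b <= 0x7A else b) * p
--         p = p * 33 % M
--     return total % M
-- ===== Notes on version B (the rewrite author's own statement) =====
-- stated objective: alternative
-- what changed: Instead of A's forward Horner loop with per-step masking, B pre-cuts the data (max_length slice, then find the first null byte), then evaluates the hash as a polynomial back-to-front: it walks the bytes in REVERSE keeping a running modular power of 33, adds the seed term 5381*pow(33,n,2^32) computed by modular exponentiation, and reduces mod 2^32 once at the end.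
import Mathlib
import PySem

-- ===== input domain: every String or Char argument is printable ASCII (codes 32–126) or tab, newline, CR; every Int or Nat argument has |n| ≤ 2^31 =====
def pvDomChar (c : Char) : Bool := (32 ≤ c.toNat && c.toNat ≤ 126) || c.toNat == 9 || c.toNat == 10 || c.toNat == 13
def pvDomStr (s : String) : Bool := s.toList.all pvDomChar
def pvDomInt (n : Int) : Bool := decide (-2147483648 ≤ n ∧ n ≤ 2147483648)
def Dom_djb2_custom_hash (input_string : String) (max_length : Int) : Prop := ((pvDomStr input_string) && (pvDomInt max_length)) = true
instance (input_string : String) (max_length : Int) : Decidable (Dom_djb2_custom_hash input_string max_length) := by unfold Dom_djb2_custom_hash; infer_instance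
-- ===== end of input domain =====

-- B pre-cuts the data (max_length slice, then first null byte), then evaluates the hash as a
-- polynomial over the REVERSED byte list with a running modular power of 33, plus a modular-power
-- seed term, with one final mod — instead of A's forward masked Horner loop.

-- ===== PORT A =====
-- Python's '&' on nonnegative ints is Int.land; the loop with its two breaks becomes structural recursion.
def djb2Loop : List Int → Int → Int → Int → Int
  | [], _, _, result => result
  | b :: rest, i, maxl, result =>
    if maxl > 0 ∧ i ≥ maxl then result
    else if b = 0 then result
    else
      let byte := if 0x61 ≤ b ∧ b ≤ 0x7A then b - 0x20 else b
      djb2Loop rest (i + 1) maxl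
        (Int.land (32 * Int.land result 4294967295 + byte + Int.land result 4294967295) 4294967295)

def djb2_custom_hash (input_string : String) (max_length : Int) : Int :=
  djb2Loop (input_string.toList.map fun c => (c.toNat : Int)) 0 max_length 0x1505

-- ===== PORT B =====
def adjB (b : Int) : Int := if 0x61 ≤ b ∧ b ≤ 0x7A then b - 0x20 else b

-- Source B's reverse loop over the cut data: running total and running power p = 33^k % 2^32.
-- Python '%' with the positive divisor 2^32 agrees exactly with Lean's Int '%' (both in [0, 2^32)).
def revFoldB : List Int → Int → Int → Int
  | [], total, _ => total
  | b :: rest, total, p => revFoldB rest (total + adjB b * p) (p * 33 % 4294967296)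

def djb2_custom_hash_alt (input_string : String) (max_length : Int) : Int :=
  let bytes := input_string.toList.map fun c => (c.toNat : Int)
  let data := if max_length > 0 then bytes.take max_length.toNat else bytes
  -- 'cut = data.find(0); if cut >= 0: data = data[:cut]' — find of a single byte, ported by hand (exact):
  let data2 := match data.findIdx? (fun b => b == 0) with
    | some i => data.take i
    | none => data
  let total := 5381 * PySem.Int.powMod 33 data2.length 4294967296
  revFoldB data2.reverse total 1 % 4294967296

-- ===== PRECONDITION & SPEC =====
def Spec_djb2_custom_hash (input_string : String) (max_length : Int) (out : Int) : Prop := out = djb2_custom_hash_alt input_string max_length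
instance (input_string : String) (max_length : Int) (out : Int) : Decidable (Spec_djb2_custom_hash input_string max_length out) := by unfold Spec_djb2_custom_hash; infer_instance

-- ===== CLAIM (what is proved, stated in full; the proofs are below) =====
def Claim_equal_djb2_custom_hash : Prop := ∀ (input_string : String) (max_length : Int), Dom_djb2_custom_hash input_string max_length → Spec_djb2_custom_hash input_string max_length (djb2_custom_hash input_string max_length)

-- ===== LEMMAS AND PROOFS =====

-- A's masked step, isolated for the proofs.
def djb2Step (r b : Int) : Int :=
  Int.land (r * 33 + adjB b) 4294967295

theorem land_mask_eq_emod (x : Int) (h : 0 ≤ x) : Int.land x 4294967295 = x % 4294967296 := by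
  lift x to ℕ using h
  rw [show (4294967295 : Int) = ((4294967295 : ℕ) : Int) by norm_num]
  rw [show Int.land (x : Int) ((4294967295 : ℕ) : Int) = ((x &&& 4294967295 : ℕ) : Int) from rfl]
  rw [Nat.and_two_pow_sub_one_eq_mod x 32]
  push_cast
  norm_num

theorem adjB_nonneg (b : Int) (hb : 0 ≤ b) : 0 ≤ adjB b := by
  unfold adjB; split <;> omega

-- A's loop equals a fold of the masked step over the truncated, null-cut prefix.
theorem loop_eq (l : List Int) : ∀ (i m r : Int), 0 ≤ r → r < 4294967296 →
    (∀ b ∈ l, 0 ≤ b) →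
    djb2Loop l i m r =
      ((if m > 0 then l.take (m - i).toNat else l).takeWhile fun b => b != 0).foldl djb2Step r := by
  induction l with
  | nil =>
    intro i m r _ _ _
    simp [djb2Loop]
  | cons b rest ih =>
    intro i m r hr0 hr1 hl
    have hb : 0 ≤ b := hl b (by simp)
    by_cases hbreak : m > 0 ∧ i ≥ m
    · have : (m - i).toNat = 0 := by omega
      simp [djb2Loop, hbreak, this]
    · rw [djb2Loop, if_neg hbreak]
      by_cases hz : b = 0
      · subst hz
        by_cases hm : m > 0
        · have ht : (m - i).toNat = (m - (i + 1)).toNat + 1 := by omega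
          simp [hm, ht]
        · simp [hm]
      · rw [if_neg hz]
        have hbyte : 0 ≤ adjB b := adjB_nonneg b hb
        have hmask : Int.land r 4294967295 = r := by
          rw [land_mask_eq_emod r hr0, Int.emod_eq_of_lt hr0 hr1]
        have hstep : Int.land (32 * Int.land r 4294967295 +
            (if 0x61 ≤ b ∧ b ≤ 0x7A then b - 0x20 else b) + Int.land r 4294967295) 4294967295
            = djb2Step r b := by
          rw [hmask, djb2Step, adjB]
          ring_nf
        have hval : 0 ≤ r * 33 + adjB b := by omega
        have hnext0 : 0 ≤ djb2Step r b := by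
          rw [djb2Step, land_mask_eq_emod _ hval]
          exact Int.emod_nonneg _ (by norm_num)
        have hnext1 : djb2Step r b < 4294967296 := by
          rw [djb2Step, land_mask_eq_emod _ hval]
          exact Int.emod_lt_of_pos _ (by norm_num)
        have hrest : ∀ x ∈ rest, 0 ≤ x := fun x hx => hl x (by simp [hx])
        show djb2Loop rest (i + 1) m
            (Int.land (32 * Int.land r 4294967295 +
              (if 0x61 ≤ b ∧ b ≤ 0x7A then b - 0x20 else b) + Int.land r 4294967295) 4294967295) = _
        rw [hstep, ih (i + 1) m (djb2Step r b) hnext0 hnext1 hrest]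
        by_cases hm : m > 0
        · have ht : (m - i).toNat = (m - (i + 1)).toNat + 1 := by omega
          simp [hm, ht, hz]
        · simp [hm, hz]

-- The hash as an explicit polynomial, front-to-back (weights 33^(n-1-i)) …
def Spoly : List Int → Int
  | [] => 0
  | b :: rest => adjB b * 33 ^ rest.length + Spoly rest

-- … and back-to-front (weights 33^j over the reversed list).
def Tpoly : List Int → Int
  | [] => 0
  | b :: rest => adjB b + 33 * Tpoly rest

theorem foldl_step_eq_poly (l : List Int) : ∀ r : Int, 0 ≤ r → r < 4294967296 →
    (∀ b ∈ l, 0 ≤ b) →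
    l.foldl djb2Step r = (r * 33 ^ l.length + Spoly l) % 4294967296 := by
  induction l with
  | nil =>
    intro r hr0 hr1 _
    simp [Spoly, Int.emod_eq_of_lt hr0 hr1]
  | cons b rest ih =>
    intro r hr0 hr1 hl
    have hb : 0 ≤ b := hl b (by simp)
    have hval : 0 ≤ r * 33 + adjB b := by
      have := adjB_nonneg b hb; omega
    have hstep : djb2Step r b = (r * 33 + adjB b) % 4294967296 := by
      rw [djb2Step, land_mask_eq_emod _ hval]
    have h0 : 0 ≤ djb2Step r b := by
      rw [hstep]; exact Int.emod_nonneg _ (by norm_num)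
    have h1 : djb2Step r b < 4294967296 := by
      rw [hstep]; exact Int.emod_lt_of_pos _ (by norm_num)
    have hrest : ∀ x ∈ rest, 0 ≤ x := fun x hx => hl x (by simp [hx])
    rw [List.foldl_cons, ih _ h0 h1 hrest, hstep]
    have hcong : (((r * 33 + adjB b) % 4294967296) * 33 ^ rest.length + Spoly rest) % 4294967296
        = ((r * 33 + adjB b) * 33 ^ rest.length + Spoly rest) % 4294967296 :=
      Int.ModEq.add_right _ (Int.ModEq.mul_right _ (Int.emod_emod_of_dvd _ dvd_rfl))
    rw [hcong]
    congr 1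
    rw [Spoly, List.length_cons, pow_succ]
    ring

theorem revFoldB_eq (m : List Int) : ∀ t p : Int,
    revFoldB m t p % 4294967296 = (t + Tpoly m * p) % 4294967296 := by
  induction m with
  | nil => intro t p; simp [revFoldB, Tpoly]
  | cons b rest ih =>
    intro t p
    rw [revFoldB, ih]
    have hcong : (t + adjB b * p + Tpoly rest * (p * 33 % 4294967296)) % 4294967296
        = (t + adjB b * p + Tpoly rest * (p * 33)) % 4294967296 :=
      Int.ModEq.add_left _ (Int.ModEq.mul_left _ (Int.emod_emod_of_dvd _ dvd_rfl))
    rw [hcong]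
    congr 1
    rw [Tpoly]
    ring

theorem Tpoly_append (m : List Int) (b : Int) :
    Tpoly (m ++ [b]) = Tpoly m + adjB b * 33 ^ m.length := by
  induction m with
  | nil => simp [Tpoly]
  | cons c rest ih =>
    simp only [List.cons_append, Tpoly, ih, List.length_cons]
    rw [pow_succ]
    ring

theorem Spoly_eq_Tpoly_reverse (l : List Int) : Spoly l = Tpoly l.reverse := by
  induction l with
  | nil => simp [Spoly, Tpoly]
  | cons b rest ih =>
    rw [Spoly, List.reverse_cons, Tpoly_append, List.length_reverse, ih]
    ring

theorem findIdx?_cut_eq_takeWhile (l : List Int) :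
    (match l.findIdx? (fun b => b == 0) with
      | some i => l.take i
      | none => l) = l.takeWhile fun b => b != 0 := by
  induction l with
  | nil => simp
  | cons b rest ih =>
    by_cases hz : b = 0
    · subst hz
      simp [List.findIdx?_cons, List.takeWhile]
    · rw [List.findIdx?_cons]
      simp only [beq_iff_eq, hz, if_false, List.takeWhile]
      have hb : (b != 0) = true := by simp [hz]
      rw [hb]
      cases hfi : rest.findIdx? (fun b => b == 0) with
      | none => simp [hfi] at ih ⊢; exact ih
      | some i => simp [hfi] at ih ⊢; exact ih

-- ===== VERDICT (by name: the statement is the Claim_ definition above) =====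
theorem djb2_custom_hash_spec : Claim_equal_djb2_custom_hash := by
  intro s m _
  unfold Spec_djb2_custom_hash
  have hnn : ∀ b ∈ s.toList.map (fun c => (c.toNat : Int)), 0 ≤ b := by
    intro b hb; simp at hb; obtain ⟨c, _, rfl⟩ := hb; positivity
  simp only [djb2_custom_hash, djb2_custom_hash_alt]
  rw [loop_eq _ 0 m 0x1505 (by norm_num) (by norm_num) hnn, Int.sub_zero]
  rw [findIdx?_cut_eq_takeWhile]
  set data := if m > 0 then (s.toList.map fun c => (c.toNat : Int)).take m.toNat
      else s.toList.map fun c => (c.toNat : Int) with hdata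
  set cut := data.takeWhile (fun b => b != 0) with hcut
  have hcutnn : ∀ b ∈ cut, 0 ≤ b := by
    intro b hb
    have hd : b ∈ data := (List.takeWhile_sublist _).subset (hcut ▸ hb)
    rw [hdata] at hd
    apply hnn
    split at hd
    · exact List.mem_of_mem_take hd
    · exact hd
  rw [foldl_step_eq_poly cut 0x1505 (by norm_num) (by norm_num) hcutnn]
  rw [revFoldB_eq, mul_one, Spoly_eq_Tpoly_reverse]
  have hpow : PySem.Int.powMod 33 cut.length 4294967296 = 33 ^ cut.length % 4294967296 := by
    unfold PySem.Int.powMod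
    rw [PySem.Int.mod_eq_emod_of_pos (by norm_num)]
  rw [hpow]
  exact (Int.ModEq.add_right _ (Int.ModEq.mul_left _ (Int.emod_emod_of_dvd _ dvd_rfl))).symm
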